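-- pv_equiv track=rewrite | github.com/eliaspercy/eliaspercy.github.io | poly_atp.py | promise_wnu_axioms
-- ===== SOURCE A (Python) =====
-- def promise_wnu_axioms(arity: int, fs: str = 'f', title_prefix: str = 'polywnu') -> str:
--     """
--     arity: the arity of the polymorphism
--     title_prefix: the prefix to the title the clauses shall have
--     """
--     assert arity >= 2
--
--     vars = ['X' for _ in range(arity-1)] + ['Y']
--     cycles = list(
--         map(','.join, reversed([vars[i:]+vars[:i%arity] for i in range(arity)]))
--     )
--
--     axiom = lambda str1, str2, num: (
--         f"cnf({title_prefix}_{num},axiom,\n" +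
--         f"    ( {fs}({str1}) = {fs}({str2}) )).\n"
--     )
--     return '\n'.join(
--         [axiom(cycles[i], cycles[i+1], i+1) for i in range(arity-1)]
--     )
-- ===== SOURCE B (Python) =====
-- def promise_wnu_axioms(arity: int, fs: str = 'f', title_prefix: str = 'polywnu') -> str:
--     """Same output by direct construction: row j is the token list with 'Y' at
--     index j and 'X' elsewhere, so no rotation/reverse machinery is needed."""
--     assert arity >= 2
--
--     def row(j: int) -> str:
--         return ','.join('Y' if k == j else 'X' for k in range(arity))
--
--     return '\n'.join(
--         f"cnf({title_prefix}_{i+1},axiom,\n"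
--         f"    ( {fs}({row(i)}) = {fs}({row(i+1)}) )).\n"
--         for i in range(arity - 1)
--     )
-- ===== Notes on version B (the rewrite author's own statement) =====
-- stated objective: simpler
-- what changed: B drops A's rotate-all-cycles-then-reverse construction and builds each token row directly by placing 'Y' at index j (row j has Y at position j), emitting the axioms in one comprehension.
import Mathlib
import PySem

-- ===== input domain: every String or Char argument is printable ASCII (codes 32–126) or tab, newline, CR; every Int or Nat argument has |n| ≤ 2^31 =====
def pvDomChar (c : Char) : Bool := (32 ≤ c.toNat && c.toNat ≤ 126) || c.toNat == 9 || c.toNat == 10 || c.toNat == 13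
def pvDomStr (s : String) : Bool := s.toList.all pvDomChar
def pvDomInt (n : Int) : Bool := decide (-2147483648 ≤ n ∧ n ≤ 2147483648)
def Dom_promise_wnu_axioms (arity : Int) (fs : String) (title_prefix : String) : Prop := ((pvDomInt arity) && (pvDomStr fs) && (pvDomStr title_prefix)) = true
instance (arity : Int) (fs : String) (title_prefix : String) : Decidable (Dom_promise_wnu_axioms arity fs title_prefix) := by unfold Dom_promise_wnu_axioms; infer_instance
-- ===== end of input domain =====

-- B builds each token row directly with 'Y' at index j instead of A's rotate-and-reverse construction; objective: simpler.


-- ===== PORT A =====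
-- the f-string body shared by both Pythons, transliterated piece for piece
def pvAxiomStr (fs title_prefix str1 str2 : String) (num : Int) : String :=
  "cnf(" ++ title_prefix ++ "_" ++ PySem.Int.toStr num ++ ",axiom,\n" ++
  "    ( " ++ fs ++ "(" ++ str1 ++ ") = " ++ fs ++ "(" ++ str2 ++ ") )).\n"

-- literal port of A; the `if arity < 2` guard totalises the `assert arity >= 2`
-- (those inputs raise in Python and are excluded by Pre_).
def promise_wnu_axioms (arity : Int) (fs : String) (title_prefix : String) : String :=
  if arity < 2 then "" else
  let n : Nat := arity.toNat
  -- vars = ['X' for _ in range(arity-1)] + ['Y']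
  let vars : List String := List.replicate (n - 1) "X" ++ ["Y"]
  -- cycles = list(map(','.join, reversed([vars[i:]+vars[:i%arity] for i in range(arity)])))
  -- (slices vars[i:], vars[:i%arity] with 0 ≤ i < arity are exactly drop/take)
  let cycles : List String :=
    (((List.range n).map (fun i => vars.drop i ++ vars.take (i % n))).reverse).map
      (fun toks => PySem.Str.join "," toks)
  PySem.Str.join "\n"
    ((List.range (n - 1)).map (fun (i : Nat) =>
      pvAxiomStr fs title_prefix
        ((PySem.List.pyGet? cycles (i : Int)).getD "")
        ((PySem.List.pyGet? cycles ((i : Int) + 1)).getD "")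
        ((i : Int) + 1)))

-- ===== PORT B =====
-- row j = ','.join('Y' if k == j else 'X' for k in range(arity))
def pvRow (n j : Nat) : String :=
  PySem.Str.join "," ((List.range n).map (fun k => if k = j then "Y" else "X"))

def promise_wnu_axioms_alt (arity : Int) (fs : String) (title_prefix : String) : String :=
  if arity < 2 then "" else
  let n : Nat := arity.toNat
  PySem.Str.join "\n"
    ((List.range (n - 1)).map (fun i =>
      pvAxiomStr fs title_prefix (pvRow n i) (pvRow n (i + 1)) ((i : Int) + 1)))

-- ===== PRECONDITION & SPEC =====
-- Pre_ excludes exactly the inputs on which A's `assert arity >= 2` raises AssertionError.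
def Pre_promise_wnu_axioms (arity : Int) (fs : String) (title_prefix : String) : Prop := 2 ≤ arity
instance (arity : Int) (fs : String) (title_prefix : String) : Decidable (Pre_promise_wnu_axioms arity fs title_prefix) := by unfold Pre_promise_wnu_axioms; infer_instance
def pvWitness_promise_wnu_axioms : Int × String × String := (3, "f", "polywnu")
def Spec_promise_wnu_axioms (arity : Int) (fs : String) (title_prefix : String) (out : String) : Prop := out = promise_wnu_axioms_alt arity fs title_prefix
instance (arity : Int) (fs : String) (title_prefix : String) (out : String) : Decidable (Spec_promise_wnu_axioms arity fs title_prefix out) := by unfold Spec_promise_wnu_axioms; infer_instance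

-- ===== CLAIM (what is proved, stated in full; the proofs are below) =====
def Claim_equal_promise_wnu_axioms : Prop := ∀ (arity : Int) (fs : String) (title_prefix : String), Dom_promise_wnu_axioms arity fs title_prefix → Pre_promise_wnu_axioms arity fs title_prefix → Spec_promise_wnu_axioms arity fs title_prefix (promise_wnu_axioms arity fs title_prefix)

-- ===== LEMMAS AND PROOFS =====

-- B's row, as an explicit list of tokens
def pvMask (n j : Nat) : List String :=
  (List.range n).map (fun k => if k = j then "Y" else "X")

lemma pvMask_eq (n j : Nat) (h : j < n) :
    pvMask n j = List.replicate j "X" ++ "Y" :: List.replicate (n - 1 - j) "X" := by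
  induction n with
  | zero => omega
  | succ m ih =>
    rcases Nat.lt_or_ge j m with hj | hj
    · have := ih hj
      simp only [pvMask, List.range_succ, List.map_append, List.map_cons, List.map_nil] at this ⊢
      rw [this]
      have hne : ¬ (m = j) := by omega
      have h4 : m + 1 - 1 - j = (m - 1 - j) + 1 := by omega
      simp only [hne, if_false, h4, List.replicate_succ']
      simp
    · have hj' : j = m := by omega
      subst hj'
      simp only [pvMask, List.range_succ, List.map_append, List.map_cons, List.map_nil]
      have : ∀ k ∈ List.range j, (if k = j then "Y" else "X") = "X" := by
        intro k hk; simp only [List.mem_range] at hk; simp [Nat.ne_of_lt hk]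
      rw [List.map_congr_left this]
      simp

lemma pvReverse_map_range {α : Type} (f : Nat → α) (n : Nat) :
    ((List.range n).map f).reverse = (List.range n).map (fun j => f (n - 1 - j)) := by
  apply List.ext_getElem
  · simp
  · intro i h1 h2
    simp only [List.length_reverse, List.length_map, List.length_range] at h1
    rw [List.getElem_reverse]
    simp only [List.getElem_map, List.getElem_range, List.length_map, List.length_range]

-- A's rotation i of vars is the row with 'Y' at index n-1-i
lemma pvRot_eq (n i : Nat) (hn : 1 ≤ n) (hi : i < n) :
    (List.replicate (n - 1) "X" ++ ["Y"]).drop i ++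
      (List.replicate (n - 1) "X" ++ ["Y"]).take (i % n) =
    pvMask n (n - 1 - i) := by
  have hmod : i % n = i := Nat.mod_eq_of_lt hi
  have hle : i ≤ n - 1 := by omega
  rw [hmod, pvMask_eq n (n - 1 - i) (by omega)]
  rw [List.drop_append_of_le_length (by simpa using hle),
      List.take_append_of_le_length (by simpa using hle)]
  simp only [List.drop_replicate, List.take_replicate]
  have h1 : n - 1 - i = min i (n - 1) + (n - 1 - i) - i := by omega
  have h2 : min i (n - 1) = i := by omega
  have h3 : n - 1 - (n - 1 - i) = i := by omega
  rw [h2, h3]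
  simp

-- A's cycles list: cycles[j] is B's row j, joined
lemma pvCycles_eq (n : Nat) (hn : 2 ≤ n) :
    ((((List.range n).map (fun i =>
        (List.replicate (n - 1) "X" ++ ["Y"]).drop i ++
        (List.replicate (n - 1) "X" ++ ["Y"]).take (i % n))).reverse).map
      (fun toks => PySem.Str.join "," toks)) =
    (List.range n).map (fun j => pvRow n j) := by
  rw [pvReverse_map_range]
  rw [List.map_map]
  apply List.map_congr_left
  intro j hj
  simp only [List.mem_range] at hj
  simp only [Function.comp_apply]
  rw [pvRot_eq n (n - 1 - j) (by omega) (by omega)]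
  have : n - 1 - (n - 1 - j) = j := by omega
  rw [this]
  rfl

lemma pvGet_map_range (f : Nat → String) (n i : Nat) (h : i < n) :
    (PySem.List.pyGet? ((List.range n).map f) (i : Int)).getD "" = f i := by
  rw [PySem.List.pyGet?_natCast]
  simp [h]

-- ===== VERDICT (by name: the statement is the Claim_ definition above) =====
theorem promise_wnu_axioms_spec : Claim_equal_promise_wnu_axioms := by
  intro arity fs title_prefix _hdom hpre
  have hpre' : 2 ≤ arity := hpre
  unfold Spec_promise_wnu_axioms promise_wnu_axioms promise_wnu_axioms_alt
  have hlt : ¬ arity < 2 := by omega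
  simp only [hlt, if_false]
  have hn : 2 ≤ arity.toNat := by omega
  set n := arity.toNat with hndef
  congr 1
  apply List.map_congr_left
  intro i hi
  simp only [List.mem_range] at hi
  rw [pvCycles_eq n hn]
  have h1 : ((i : Int) + 1) = ((i + 1 : Nat) : Int) := by push_cast; ring
  rw [pvGet_map_range (fun j => pvRow n j) n i (by omega), h1,
      pvGet_map_range (fun j => pvRow n j) n (i + 1) (by omega)]
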